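-- pv_equiv track=rewrite | github.com/sheric98/minesweeper_prob | minesweeper.py | comb_and_comp
-- ===== SOURCE A (Python) =====
-- def comb_and_comp(lst, n):
--     # no combinations
--     if len(lst) < n or n < 0:
--         return
--     # trivial 'empty' combination
--     if n == 0 or lst == []:
--         yield [], lst
--     else:
--         first, rest = lst[0], lst[1:]
--         # combinations that contain the first element
--         for in_, out in comb_and_comp(rest, n - 1):
--             yield [first] + in_, out
--         # combinations that do not contain the first element
--         for in_, out in comb_and_comp(rest, n):
--             yield in_, [first] + out
-- ===== SOURCE B (Python) =====
-- # Lexicographic index-combination enumeration: pick the first chosen index i,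
-- # recurse on positions after i, then rebuild both halves by indexing/filtering.
-- def comb_and_comp(lst, n):
--     m = len(lst)
--     if n < 0 or n > m:
--         return
--
--     def idx_combos(start, k):
--         if k == 0:
--             yield []
--             return
--         for i in range(start, m - k + 1):
--             for tail in idx_combos(i + 1, k - 1):
--                 yield [i] + tail
--
--     for combo in idx_combos(0, n):
--         chosen = set(combo)
--         yield ([lst[i] for i in combo],
--                [lst[i] for i in range(m) if i not in chosen])
-- ===== Notes on version B (the rewrite author's own statement) =====
-- stated objective: alternative
-- what changed: Replaces A's include/exclude recursion that threads both result lists through every call by a lexicographic enumeration of index combinations (choose the first chosen index, recurse on later positions), rebuilding the chosen list and its complement by indexing and filtering the original list.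
import Mathlib
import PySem

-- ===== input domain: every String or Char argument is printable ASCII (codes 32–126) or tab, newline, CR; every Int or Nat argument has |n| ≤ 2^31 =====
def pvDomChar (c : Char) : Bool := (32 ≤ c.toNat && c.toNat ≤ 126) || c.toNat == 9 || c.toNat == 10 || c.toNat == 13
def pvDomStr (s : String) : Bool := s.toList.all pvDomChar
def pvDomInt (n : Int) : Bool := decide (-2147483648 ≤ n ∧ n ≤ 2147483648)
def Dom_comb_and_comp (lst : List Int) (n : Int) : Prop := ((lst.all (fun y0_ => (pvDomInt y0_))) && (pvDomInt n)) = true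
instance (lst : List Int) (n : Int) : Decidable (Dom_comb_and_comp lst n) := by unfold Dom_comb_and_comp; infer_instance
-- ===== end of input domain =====

-- B replaces A's include/exclude recursion (which threads both lists through every call)
-- by a lexicographic enumeration of index combinations plus index/filter reconstruction;
-- alternative decomposition, same cost.

-- ===== PORT A =====
-- literal transliteration of A's generator recursion (the generator's yielded sequence as a list)
def comb_and_comp (lst : List Int) (n : Int) : List (List Int × List Int) :=
  if (lst.length : Int) < n ∨ n < 0 then []
  else if n = 0 ∨ lst = [] then [([], lst)]
  else
    match lst with
    | [] => []  -- unreachable: lst ≠ [] here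
    | first :: rest =>
        ((comb_and_comp rest (n - 1)).map (fun p => (first :: p.1, p.2))) ++
        ((comb_and_comp rest n).map (fun p => (p.1, first :: p.2)))
termination_by lst.length

-- ===== PORT B =====
-- idx_combos(start, k): increasing k-element index lists drawn from [start, m),
-- lexicographic; 'for i in range(start, m - k + 1)' with the Python range count max(stop-start,0)
def idxCombos (m : Nat) (start : Nat) (k : Nat) : List (List Nat) :=
  match k with
  | 0 => [[]]
  | k' + 1 =>
      (List.range' start (m + 1 - (k' + 1) - start)).flatMap
        (fun i => (idxCombos m (i + 1) k').map (fun t => i :: t))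

-- membership test 'i not in chosen' ported as list membership (set(combo) has the same members)
def comb_and_comp_alt (lst : List Int) (n : Int) : List (List Int × List Int) :=
  if n < 0 ∨ (lst.length : Int) < n then []
  else
    (idxCombos lst.length 0 n.toNat).map (fun c =>
      (c.map (fun i => lst.getD i 0),
       ((List.range lst.length).filter (fun i => !(c.contains i))).map (fun i => lst.getD i 0)))

-- ===== PRECONDITION & SPEC =====
def Spec_comb_and_comp (lst : List Int) (n : Int) (out : List (List Int × List Int)) : Prop := out = comb_and_comp_alt lst n
instance (lst : List Int) (n : Int) (out : List (List Int × List Int)) : Decidable (Spec_comb_and_comp lst n out) := by unfold Spec_comb_and_comp; infer_instance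

-- ===== CLAIM (what is proved, stated in full; the proofs are below) =====
def Claim_equal_comb_and_comp : Prop := ∀ (lst : List Int) (n : Int), Dom_comb_and_comp lst n → Spec_comb_and_comp lst n (comb_and_comp lst n)

-- ===== LEMMAS AND PROOFS =====

-- reference recursion (Nat-indexed shape both ports are reduced to)
def refCC : List Int → Nat → List (List Int × List Int)
  | l, 0 => [([], l)]
  | [], _ + 1 => []
  | x :: xs, k + 1 =>
      ((refCC xs k).map (fun p => (x :: p.1, p.2))) ++
      ((refCC xs (k + 1)).map (fun p => (p.1, x :: p.2)))

lemma refCC_nil (l : List Int) (k : Nat) (h : l.length < k) : refCC l k = [] := by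
  induction l generalizing k with
  | nil => cases k with
    | zero => omega
    | succ k' => rfl
  | cons x xs ih =>
      cases k with
      | zero => omega
      | succ k' =>
          simp only [refCC]
          rw [ih k' (by simp at h; omega), ih (k' + 1) (by simp at h; omega)]
          rfl

lemma comb_eq_refCC (lst : List Int) (n : Int) (h0 : 0 ≤ n) (h1 : n ≤ lst.length) :
    comb_and_comp lst n = refCC lst n.toNat := by
  induction lst generalizing n with
  | nil =>
      have : n = 0 := by simp at h1; omega
      subst this
      simp [comb_and_comp, refCC]
  | cons x xs ih =>
      by_cases hz : n = 0
      · subst hz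
        rw [comb_and_comp.eq_def]
        rw [if_neg (by push_neg; exact ⟨Int.natCast_nonneg _, le_refl 0⟩), if_pos (Or.inl rfl)]
        rfl
      · have hpos : 0 < n := lt_of_le_of_ne h0 (Ne.symm hz)
        rw [comb_and_comp.eq_def]
        rw [if_neg (by push_neg; exact ⟨h1, h0⟩), if_neg (by simp [hz])]
        have hn1 : n.toNat = (n - 1).toNat + 1 := by omega
        rw [hn1]
        simp only [refCC]
        have e1 : comb_and_comp xs (n - 1) = refCC xs (n - 1).toNat := by
          apply ih <;> simp at h1 ⊢ <;> omega
        by_cases h2 : n ≤ (xs.length : Int)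
        · have e2 : comb_and_comp xs n = refCC xs n.toNat := ih n h0 h2
          rw [e1, e2, hn1]
        · have e2 : comb_and_comp xs n = [] := by
            rw [comb_and_comp.eq_def, if_pos (Or.inl (by omega))]
          have e3 : refCC xs ((n - 1).toNat + 1) = [] := refCC_nil _ _ (by omega)
          rw [e1, e2, e3]

-- shift: combinations drawn from [s+1, m+1) are the (+1)-image of those from [s, m)
lemma idxCombos_shift (k : Nat) : ∀ (m s : Nat),
    idxCombos (m + 1) (s + 1) k = (idxCombos m s k).map (List.map (· + 1)) := by
  induction k with
  | zero => intro m s; rfl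
  | succ k' ih =>
      intro m s
      simp only [idxCombos]
      have hc : m + 1 + 1 - (k' + 1) - (s + 1) = m + 1 - (k' + 1) - s := by omega
      rw [hc, List.range'_succ_left]
      rw [List.flatMap_map, List.map_flatMap]
      apply List.flatMap_congr
      intro i _
      show (idxCombos (m + 1) (i + 1 + 1) k').map (fun t => (i + 1) :: t)
         = ((idxCombos m (i + 1) k').map (fun t => i :: t)).map (List.map (· + 1))
      rw [ih m (i + 1)]
      simp [List.map_map, Function.comp]

lemma idxCombos_empty (m s k : Nat) (h : m ≤ k + s) : idxCombos m s (k + 1) = [] := by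
  simp only [idxCombos]
  have h0 : m + 1 - (k + 1) - s = 0 := by omega
  rw [h0]
  rfl

-- split: size-(k+1) combinations of [0, m+1) are those starting with 0 followed by the shifted ones
lemma idxCombos_split (m k : Nat) :
    idxCombos (m + 1) 0 (k + 1) =
      ((idxCombos m 0 k).map (fun t => 0 :: t.map (· + 1))) ++
      ((idxCombos m 0 (k + 1)).map (List.map (· + 1))) := by
  by_cases hm : m < k
  · have h1 : idxCombos (m + 1) 0 (k + 1) = [] := idxCombos_empty _ _ _ (by omega)
    have h3 : idxCombos m 0 (k + 1) = [] := idxCombos_empty _ _ _ (by omega)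
    have h2 : idxCombos m 0 k = [] := by
      cases k with
      | zero => omega
      | succ k'' => exact idxCombos_empty _ _ _ (by omega)
    rw [h1, h2, h3]; rfl
  · simp only [idxCombos]
    have hc : m + 1 + 1 - (k + 1) - 0 = (m - k) + 1 := by omega
    rw [hc, List.range'_succ, List.flatMap_cons, List.range'_succ_left]
    congr 1
    · rw [idxCombos_shift k m 0]
      simp [List.map_map, Function.comp]
    · rw [List.flatMap_map, List.map_flatMap]
      have hc2 : m + 1 - (k + 1) - 0 = m - k := by omega
      rw [hc2]
      apply List.flatMap_congr
      intro i _
      show (idxCombos (m + 1) (i + 1 + 1) k).map (fun t => (i + 1) :: t)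
         = ((idxCombos m (i + 1) k).map (fun t => i :: t)).map (List.map (· + 1))
      rw [idxCombos_shift k m (i + 1)]
      simp [List.map_map, Function.comp]

-- the per-combination body of comb_and_comp_alt, named for the proofs
def gB (l : List Int) (c : List Nat) : List Int × List Int :=
  (c.map (fun i => l.getD i 0),
   ((List.range l.length).filter (fun i => !(c.contains i))).map (fun i => l.getD i 0))

lemma map_getD_range (l : List Int) : (List.range l.length).map (fun i => l.getD i 0) = l := by
  apply List.ext_getElem (by simp)
  intro i h1 h2
  simp [List.getD_eq_getElem?_getD, List.getElem?_eq_getElem h2]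

lemma gB_zero_shift (x : Int) (xs : List Int) (c : List Nat) :
    gB (x :: xs) (0 :: c.map (· + 1)) = (x :: (gB xs c).1, (gB xs c).2) := by
  unfold gB
  refine Prod.ext ?_ ?_
  · simp [List.map_map, Function.comp]
  · show ((List.range (xs.length + 1)).filter _).map _ = _
    rw [List.range_succ_eq_map]
    simp only [List.filter_cons, List.contains_cons, BEq.rfl, Bool.true_or, Bool.not_true,
      Bool.false_eq_true, if_false, List.filter_map, List.map_map]
    rw [List.filter_congr (fun j _ => by
      show ((fun i => !((0 :: c.map (· + 1)).contains i)) ∘ Nat.succ) j = (fun i => !(c.contains i)) j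
      simp)]
    simp [Function.comp]

lemma gB_shift (x : Int) (xs : List Int) (c : List Nat) :
    gB (x :: xs) (c.map (· + 1)) = ((gB xs c).1, x :: (gB xs c).2) := by
  unfold gB
  refine Prod.ext ?_ ?_
  · simp [List.map_map, Function.comp]
  · show ((List.range (xs.length + 1)).filter _).map _ = _
    rw [List.range_succ_eq_map]
    simp only [List.filter_cons, List.filter_map]
    rw [List.filter_congr (fun j _ => by
      show ((fun i => !((c.map (· + 1)).contains i)) ∘ Nat.succ) j = (fun i => !(c.contains i)) j
      simp)]
    simp [Function.comp]

lemma alt_body_eq_refCC (lst : List Int) (k : Nat) (hk : k ≤ lst.length) :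
    (idxCombos lst.length 0 k).map (gB lst) = refCC lst k := by
  induction lst generalizing k with
  | nil =>
      simp only [List.length_nil, Nat.le_zero] at hk
      subst hk
      simp [idxCombos, gB, refCC]
  | cons x xs ih =>
      cases k with
      | zero =>
          show [gB (x :: xs) []] = [([], x :: xs)]
          unfold gB
          rw [show (fun i => !(([] : List Nat).contains i)) = (fun _ : Nat => true) from
            funext (fun i => by simp)]
          rw [List.filter_true, map_getD_range]
          rfl
      | succ k' =>
          rw [List.length_cons, idxCombos_split, List.map_append, List.map_map, List.map_map]
          simp only [refCC]
          congr 1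
          · rw [← ih k' (by simp at hk; omega), List.map_map]
            apply List.map_congr_left
            intro c _
            show gB (x :: xs) (0 :: c.map (· + 1)) = (fun p => (x :: p.1, p.2)) (gB xs c)
            rw [gB_zero_shift]
          · by_cases h2 : k' + 1 ≤ xs.length
            · rw [← ih (k' + 1) h2, List.map_map]
              apply List.map_congr_left
              intro c _
              show gB (x :: xs) (c.map (· + 1)) = (fun p => (p.1, x :: p.2)) (gB xs c)
              rw [gB_shift]
            · rw [idxCombos_empty _ _ _ (by omega), refCC_nil _ _ (by omega)]
              rfl

lemma alt_eq_map_gB (lst : List Int) (n : Int) (h : ¬ (n < 0 ∨ (lst.length : Int) < n)) :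
    comb_and_comp_alt lst n = (idxCombos lst.length 0 n.toNat).map (gB lst) := by
  unfold comb_and_comp_alt gB
  rw [if_neg h]

-- ===== VERDICT (by name: the statement is the Claim_ definition above) =====
theorem comb_and_comp_spec : Claim_equal_comb_and_comp := by
  intro lst n _
  unfold Spec_comb_and_comp
  by_cases hg : n < 0 ∨ (lst.length : Int) < n
  · rw [comb_and_comp_alt, if_pos hg, comb_and_comp.eq_def, if_pos (by tauto)]
  · push_neg at hg
    rw [alt_eq_map_gB lst n (by push_neg; exact hg)]
    rw [comb_eq_refCC lst n hg.1 hg.2]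
    exact (alt_body_eq_refCC lst n.toNat (by omega)).symm
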